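-- pv_equiv track=rewrite | github.com/krk-san/AtCoder-Python | venv/ABC179/abc179_b.py | solve
-- ===== SOURCE A (Python) =====
-- def solve(N, D):
--     cnt = 0
--     for d in D:
--         if d[0] == d[1]:
--             cnt += 1
--             if cnt >= 3:
--                 return "Yes"
--         else:
--             cnt = 0
--     return "No"
-- ===== SOURCE B (Python) =====
-- def solve(N, D):
--     s = ''.join('1' if d[0] == d[1] else '0' for d in D)
--     return "Yes" if '111' in s else "No"
-- ===== Notes on version B (the rewrite author's own statement) =====
-- stated objective: idiomatic
-- what changed: Replaces the fused running-counter loop with early exit by two phases: build a '0'/'1' doublet-flag string, then answer by substring search for '111'.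
import Mathlib
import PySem

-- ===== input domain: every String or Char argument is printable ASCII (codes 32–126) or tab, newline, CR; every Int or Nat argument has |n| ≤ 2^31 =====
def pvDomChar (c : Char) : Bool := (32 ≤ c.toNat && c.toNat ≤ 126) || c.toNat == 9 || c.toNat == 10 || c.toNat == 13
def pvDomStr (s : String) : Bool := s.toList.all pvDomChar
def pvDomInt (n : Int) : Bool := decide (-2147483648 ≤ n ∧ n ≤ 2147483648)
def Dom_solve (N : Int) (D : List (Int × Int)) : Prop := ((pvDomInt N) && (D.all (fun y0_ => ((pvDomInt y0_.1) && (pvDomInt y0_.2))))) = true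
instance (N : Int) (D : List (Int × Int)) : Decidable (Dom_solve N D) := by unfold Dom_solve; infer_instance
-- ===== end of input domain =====

-- B replaces A's fused running-counter loop (with early exit) by two phases:
-- build the doublet-flag string, then search it for the substring "111" (idiomatic; same cost).

-- ===== PORT A =====
-- A's for-loop with the running counter cnt and the early 'return "Yes"'.
def solveLoop : List (Int × Int) → Int → String
  | [], _ => "No"
  | d :: rest, cnt =>
    if d.1 = d.2 then
      if cnt + 1 ≥ 3 then "Yes" else solveLoop rest (cnt + 1)
    else
      solveLoop rest 0

def solve (N : Int) (D : List (Int × Int)) : String := solveLoop D 0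

-- ===== PORT B =====
def solve_alt (N : Int) (D : List (Int × Int)) : String :=
  -- s = ''.join('1' if d[0]==d[1] else '0' for d in D); ported on code points
  let s : List Char := D.map (fun d => if d.1 = d.2 then '1' else '0')
  if PySem.Chars.isIn ['1', '1', '1'] s then "Yes" else "No"

-- ===== PRECONDITION & SPEC =====
def Spec_solve (N : Int) (D : List (Int × Int)) (out : String) : Prop := out = solve_alt N D
instance (N : Int) (D : List (Int × Int)) (out : String) : Decidable (Spec_solve N D out) := by unfold Spec_solve; infer_instance

-- ===== CLAIM (what is proved, stated in full; the proofs are below) =====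
def Claim_equal_solve : Prop := ∀ (N : Int) (D : List (Int × Int)), Dom_solve N D → Spec_solve N D (solve N D)

-- ===== LEMMAS AND PROOFS =====

def flags (D : List (Int × Int)) : List Char := D.map (fun d => if d.1 = d.2 then '1' else '0')

-- Loop invariant for A: with current run length k (0 ≤ k < 3), the loop says "Yes"
-- iff the remaining flags start with 3 - k ones, or contain "111" somewhere.
theorem solveLoop_char (D : List (Int × Int)) :
    ∀ k : Nat, k < 3 →
    solveLoop D (k : Int) =
      if List.replicate (3 - k) '1' <+: flags D ∨ ['1', '1', '1'] <:+: flags D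
      then "Yes" else "No" := by
  induction D with
  | nil =>
    intro k hk
    have h1 : ¬ List.replicate (3 - k) '1' <+: ([] : List Char) := by
      intro h
      have := List.eq_nil_of_prefix_nil h
      simp [List.replicate_eq_nil_iff] at this
      omega
    have h2 : ¬ ['1', '1', '1'] <:+: ([] : List Char) := by
      intro h; simpa using List.eq_nil_of_infix_nil h
    simp only [solveLoop, flags, List.map_nil]
    rw [if_neg (by rintro (h | h); exacts [h1 h, h2 h])]
  | cons d rest ih =>
    intro k hk
    by_cases hd : d.1 = d.2
    · by_cases h3 : k = 2
      · subst h3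
        have hpre : List.replicate (3 - 2) '1' <+: flags (d :: rest) := by
          simp [flags, hd, List.replicate]
        rw [if_pos (Or.inl hpre)]
        simp [solveLoop, hd]
      · have hk2 : k + 1 < 3 := by omega
        have step : solveLoop (d :: rest) (k : Int) = solveLoop rest ((k : Int) + 1) := by
          simp [solveLoop, hd]
          omega
        have cast1 : ((k : Int) + 1) = ((k + 1 : Nat) : Int) := by push_cast; ring
        rw [step, cast1, ih (k + 1) hk2]
        -- rewrite both sides' conditions to be equal
        congr 1
        have hflag : flags (d :: rest) = '1' :: flags rest := by simp [flags, hd]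
        rw [hflag]
        have e1 : List.replicate (3 - k) '1' = '1' :: List.replicate (3 - (k + 1)) '1' := by
          have : 3 - k = (3 - (k + 1)) + 1 := by omega
          rw [this, List.replicate_succ]
        have p1 : (List.replicate (3 - k) '1' <+: '1' :: flags rest) ↔
            List.replicate (3 - (k + 1)) '1' <+: flags rest := by
          rw [e1]; exact List.cons_prefix_cons.trans (by simp)
        have p2 : (['1', '1', '1'] <:+: '1' :: flags rest) ↔
            (['1', '1'] <+: flags rest ∨ ['1', '1', '1'] <:+: flags rest) := by
          rw [List.infix_cons_iff]
          constructor
          · rintro (h | h)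
            · left
              rcases List.cons_prefix_cons.mp h with ⟨-, h'⟩
              exact h'
            · right; exact h
          · rintro (h | h)
            · left; exact List.cons_prefix_cons.mpr ⟨rfl, h⟩
            · right; exact h
        have imp : (['1', '1'] <+: flags rest) → List.replicate (3 - (k + 1)) '1' <+: flags rest := by
          intro h
          have hle : List.replicate (3 - (k + 1)) '1' <+: List.replicate 2 '1' := by
            rw [List.prefix_iff_eq_take, List.take_replicate]
            simp
          have : List.replicate 2 '1' = ['1', '1'] := by decide
          exact hle.trans (this ▸ h)
        rw [eq_iff_iff]
        constructor
        · rintro (h | h)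
          · left; exact p1.mpr h
          · right; exact p2.mpr (Or.inr h)
        · rintro (h | h)
          · left; exact p1.mp h
          · rcases p2.mp h with h' | h'
            · left; exact imp h'
            · right; exact h'
    · have hflag : flags (d :: rest) = '0' :: flags rest := by simp [flags, hd]
      have step : solveLoop (d :: rest) (k : Int) = solveLoop rest 0 := by
        simp [solveLoop, hd]
      have cast0 : (0 : Int) = ((0 : Nat) : Int) := rfl
      rw [step, cast0, ih 0 (by omega)]
      congr 1
      rw [hflag, eq_iff_iff]
      have np : ∀ m : Nat, 0 < m → ¬ List.replicate m '1' <+: '0' :: flags rest := by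
        intro m hm h
        cases m with
        | zero => omega
        | succ n =>
          rw [List.replicate_succ] at h
          rcases List.cons_prefix_cons.mp h with ⟨h1, -⟩
          exact absurd h1 (by decide)
      constructor
      · rintro (h | h)
        · right
          have e3 : List.replicate (3 - 0) '1' = ['1', '1', '1'] := by decide
          exact List.infix_cons (e3 ▸ h).isInfix
        · right; exact List.infix_cons h
      · rintro (h | h)
        · exact absurd h (np (3 - k) (by omega))
        · rcases List.infix_cons_iff.mp h with h' | h'
          · exact absurd h' (np 3 (by omega))
          · right; exact h'

-- ===== VERDICT (by name: the statement is the Claim_ definition above) =====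
theorem solve_spec : Claim_equal_solve := by
  intro N D _
  unfold Spec_solve solve solve_alt
  have h0 : (0 : Int) = ((0 : Nat) : Int) := rfl
  rw [h0, solveLoop_char D 0 (by omega)]
  have hflags : D.map (fun d => if d.1 = d.2 then '1' else '0') = flags D := rfl
  rw [hflags]
  have hisIn : PySem.Chars.isIn ['1', '1', '1'] (flags D) = true ↔ ['1', '1', '1'] <:+: flags D :=
    PySem.Chars.isIn_iff_infix _ _
  have hcond : (List.replicate (3 - 0) '1' <+: flags D ∨ ['1', '1', '1'] <:+: flags D) ↔
      ['1', '1', '1'] <:+: flags D := by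
    constructor
    · rintro (h | h)
      · have : List.replicate (3 - 0) '1' = ['1', '1', '1'] := by decide
        exact (this ▸ h).isInfix
      · exact h
    · intro h; right; exact h
  by_cases hc : ['1', '1', '1'] <:+: flags D
  · rw [if_pos (Or.inr hc)]
    simp [hisIn.mpr hc]
  · have hfalse : PySem.Chars.isIn ['1', '1', '1'] (flags D) = false := by
      rcases Bool.eq_false_or_eq_true (PySem.Chars.isIn ['1', '1', '1'] (flags D)) with h | h
      · exact absurd (hisIn.mp h) hc
      · exact h
    have hnp : ¬ (List.replicate (3 - 0) '1' <+: flags D ∨ ['1', '1', '1'] <:+: flags D) :=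
      fun h => hc (hcond.mp h)
    rw [if_neg hnp]
    simp [hfalse]
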